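-- pv_equiv track=rewrite | github.com/nadrojisk/Auburn-Class-Projects | lightup-assignments/1A/source/lightup.py | check_intersections
-- ===== SOURCE A (Python) =====
-- BULB = 10
--
-- BLACK_CELLS = [0, 1, 2, 3, 4, 5]
--
-- def check_intersections(space):
--     """Ensure there is no intersection of bulb rays.
--
--     space -- list of values for a row / column
--     """
--
--     intersection = 0
--     for cell in space:
--         if cell == BULB:
--             intersection += 1
--         if intersection >= 2:
--             return False
--         if cell in BLACK_CELLS:
--             intersection = 0
--     return True
-- ===== SOURCE B (Python) =====
-- BULB = 10
--
-- BLACK_CELLS = [0, 1, 2, 3, 4, 5]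
--
-- def check_intersections(space):
--     """Ensure there is no intersection of bulb rays.
--
--     space -- list of values for a row / column
--     """
--     segments = []
--     current = []
--     for cell in space:
--         if cell in BLACK_CELLS:
--             segments.append(current)
--             current = []
--         else:
--             current.append(cell)
--     segments.append(current)
--     return all(seg.count(BULB) < 2 for seg in segments)
-- ===== Notes on version B (the rewrite author's own statement) =====
-- stated objective: alternative
-- what changed: Replaces A's single-pass running-counter state machine (with early return and reset on black cells) by a two-phase decomposition: first split the row into segments at black cells, then check every segment contains fewer than two bulbs.
import Mathlib
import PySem

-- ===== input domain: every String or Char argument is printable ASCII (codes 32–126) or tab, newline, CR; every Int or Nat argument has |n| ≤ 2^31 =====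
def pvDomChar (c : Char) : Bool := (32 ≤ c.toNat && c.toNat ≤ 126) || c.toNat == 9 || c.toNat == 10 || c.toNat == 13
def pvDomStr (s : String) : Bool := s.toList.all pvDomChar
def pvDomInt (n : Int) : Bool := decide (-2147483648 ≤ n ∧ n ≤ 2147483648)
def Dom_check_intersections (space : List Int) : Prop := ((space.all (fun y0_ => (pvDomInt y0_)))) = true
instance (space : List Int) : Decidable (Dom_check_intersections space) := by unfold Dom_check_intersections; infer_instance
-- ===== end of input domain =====

-- B replaces A's running-counter state machine by a two-phase decomposition:
-- split the line into segments at black cells, then check each segment's bulb count (objective: simpler/alternative, same cost).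

-- ===== PORT A =====
-- A's loop: counter, early return False when counter reaches 2, reset on black cells.
def checkLoopA : Int → List Int → Bool
  | _, [] => true
  | inter, cell :: rest =>
    let inter := if cell = 10 then inter + 1 else inter
    if inter ≥ 2 then false
    else checkLoopA (if cell ∈ ([0, 1, 2, 3, 4, 5] : List Int) then 0 else inter) rest

def check_intersections (space : List Int) : Bool := checkLoopA 0 space

-- ===== PORT B =====
-- Source B's segmentation loop: fold carrying (segments, current), append final segment.
def check_intersections_alt (space : List Int) : Bool :=
  let p := space.foldl
    (fun (p : List (List Int) × List Int) cell =>
      if cell ∈ ([0, 1, 2, 3, 4, 5] : List Int) then (p.1 ++ [p.2], [])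
      else (p.1, p.2 ++ [cell]))
    ([], [])
  let segments := p.1 ++ [p.2]
  segments.all (fun seg => decide (PySem.List.count seg (10 : Int) < 2))

-- ===== PRECONDITION & SPEC =====
def Spec_check_intersections (space : List Int) (out : Bool) : Prop := out = check_intersections_alt space
instance (space : List Int) (out : Bool) : Decidable (Spec_check_intersections space out) := by unfold Spec_check_intersections; infer_instance

-- ===== CLAIM (what is proved, stated in full; the proofs are below) =====
def Claim_equal_check_intersections : Prop := ∀ (space : List Int), Dom_check_intersections space → Spec_check_intersections space (check_intersections space)

-- ===== LEMMAS AND PROOFS =====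

-- structural segmentation (proof-side characterisation of B's fold)
def segsFrom : List Int → List Int → List (List Int)
  | cur, [] => [cur]
  | cur, c :: r =>
    if c ∈ ([0, 1, 2, 3, 4, 5] : List Int) then cur :: segsFrom [] r
    else segsFrom (cur ++ [c]) r

def okSeg (seg : List Int) : Bool := decide (PySem.List.count seg (10 : Int) < 2)

lemma okSeg_eq (seg : List Int) : okSeg seg = decide (seg.count (10 : Int) < 2) := by
  simp [okSeg, PySem.List.count_eq]

lemma foldB_eq (space : List Int) : ∀ (segs : List (List Int)) (cur : List Int),
    (let p := space.foldl
      (fun (p : List (List Int) × List Int) cell =>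
        if cell ∈ ([0, 1, 2, 3, 4, 5] : List Int) then (p.1 ++ [p.2], [])
        else (p.1, p.2 ++ [cell]))
      (segs, cur);
     (p.1 ++ [p.2]).all okSeg) = (segs.all okSeg && (segsFrom cur space).all okSeg) := by
  induction space with
  | nil => intro segs cur; simp [segsFrom]
  | cons c r ih =>
    intro segs cur
    simp only [List.foldl_cons, segsFrom]
    by_cases h : c ∈ ([0, 1, 2, 3, 4, 5] : List Int)
    · simp only [if_pos h]
      rw [ih]
      simp [Bool.and_assoc]
    · simp only [if_neg h]
      rw [ih]

lemma count_ge_all_false (r : List Int) : ∀ (cur : List Int),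
    2 ≤ cur.count (10 : Int) → (segsFrom cur r).all okSeg = false := by
  induction r with
  | nil => intro cur h; simp [segsFrom, okSeg_eq]; omega
  | cons c r ih =>
    intro cur h
    simp only [segsFrom]
    by_cases hb : c ∈ ([0, 1, 2, 3, 4, 5] : List Int)
    · rw [if_pos hb]
      simp only [List.all_cons, okSeg_eq]
      have : ¬ cur.count (10 : Int) < 2 := by omega
      simp [this]
    · rw [if_neg hb]
      apply ih
      have : cur.count (10:Int) ≤ (cur ++ [c]).count (10:Int) := by
        simp [List.count_append]
      omega

lemma loopA_eq (space : List Int) : ∀ (cur : List Int),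
    cur.count (10 : Int) < 2 →
    checkLoopA ((cur.count (10 : Int) : Nat) : Int) space = (segsFrom cur space).all okSeg := by
  induction space with
  | nil =>
    intro cur h
    simp [checkLoopA, segsFrom, okSeg_eq]; omega
  | cons c r ih =>
    intro cur h
    simp only [checkLoopA, segsFrom]
    by_cases hB : c = (10 : Int)
    · have hnb : c ∉ ([0, 1, 2, 3, 4, 5] : List Int) := by subst hB; decide
      rw [if_pos hB, if_neg hnb]
      have hcnt : (cur ++ [c]).count (10 : Int) = cur.count (10 : Int) + 1 := by
        subst hB; simp [List.count_append]
      by_cases h2 : cur.count (10 : Int) + 1 ≥ 2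
      · rw [if_pos (show ((cur.count (10:Int) : Nat) : Int) + 1 ≥ 2 by exact_mod_cast h2)]
        rw [if_neg hnb, count_ge_all_false r (cur ++ [c]) (by omega)]
      · rw [if_neg (show ¬ ((cur.count (10:Int) : Nat) : Int) + 1 ≥ 2 by exact_mod_cast h2),
            if_neg hnb]
        have := ih (cur ++ [c]) (by omega)
        rw [hcnt] at this
        push_cast at this ⊢
        exact this
    · rw [if_neg hB,
          if_neg (show ¬ ((cur.count (10:Int) : Nat) : Int) ≥ 2 by exact_mod_cast (by omega : ¬ cur.count (10:Int) ≥ 2))]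
      by_cases hb : c ∈ ([0, 1, 2, 3, 4, 5] : List Int)
      · rw [if_pos hb, if_pos hb]
        have h0 := ih ([] : List Int) (by simp)
        simp only [List.count_nil, Nat.cast_zero] at h0
        simp only [List.all_cons, h0]
        have : okSeg cur = true := by rw [okSeg_eq]; simp; omega
        simp [this]
      · rw [if_neg hb, if_neg hb]
        have hcnt : (cur ++ [c]).count (10 : Int) = cur.count (10 : Int) := by
          simp [List.count_append, List.count_singleton]
          intro hc; exact hB hc
        have := ih (cur ++ [c]) (by omega)
        rw [hcnt] at this
        exact this

-- ===== VERDICT (by name: the statement is the Claim_ definition above) =====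
theorem check_intersections_spec : Claim_equal_check_intersections := by
  intro space _
  have hf := foldB_eq space [] []
  simp only [List.all_nil, Bool.true_and] at hf
  have hA := loopA_eq space ([] : List Int) (by simp)
  simp only [List.count_nil, Nat.cast_zero] at hA
  exact hA.trans hf.symm
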